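-- pv_equiv track=rewrite | github.com/sudpaul/Research_Intelligence | scopus_api_retrive/theme_alternatives_version.py | alternative_theme
-- ===== SOURCE A (Python) =====
-- def alternative_theme(alternative_subjects):
--
--     from collections import defaultdict
--     result = defaultdict(set)
--
--     themes = {'Cancer' : {'Cancer Research','Oncology', 'Cancer', 'Radiation', 'Oncology(nursing)'} ,
--          'Triple I' : {'Endocrinology','Immunology and Microbiology','Immunology', 'Microbiology',
--              'Parasitology', 'Virology', 'Dermatology', 'Allergy', 'Infectious Diseases',
--              'Rheumatology', 'Toxicology'},
--          'NHMA' : {'Clinical Neurology','Psychiatry and Mental Health', 'General Neuroscience',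
--                    'Neuroscience (miscellaneous)' , 'Behavioral Neuroscience',
--                    'Biological Psychiatry','Cellular and Molecular Neuroscience','Cognitive Neuroscience',
--                    'Developmental Neuroscience', 'Neurology' ,'Phychiatric Mental Health','Psychology (miscellaneous)',
--                    'Experimental and Cognitive Psychology', 'Neuropsychology and Physiological Psychology'},
--         'NCD' : {'Cardiology', 'Cardiovascular Medicine','Cardiology and Cardiovascular Medicine',
--            'Endocrinology, Diabetes and Metabolism',
--             'Pulmonary and Respiratory Medicine'}}
--
--
--     for key in themes:
--         if not themes[key].isdisjoint(alternative_subjects):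
--            result[key] = themes[key]&alternative_subjects
--
--     alternative = max(result, key=lambda k: len(result[k]))
--
--     return alternative
-- ===== SOURCE B (Python) =====
-- def alternative_theme(alternative_subjects):
--     from collections import Counter
--
--     themes = {'Cancer' : {'Cancer Research','Oncology', 'Cancer', 'Radiation', 'Oncology(nursing)'} ,
--          'Triple I' : {'Endocrinology','Immunology and Microbiology','Immunology', 'Microbiology',
--              'Parasitology', 'Virology', 'Dermatology', 'Allergy', 'Infectious Diseases',
--              'Rheumatology', 'Toxicology'},
--          'NHMA' : {'Clinical Neurology','Psychiatry and Mental Health', 'General Neuroscience',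
--                    'Neuroscience (miscellaneous)' , 'Behavioral Neuroscience',
--                    'Biological Psychiatry','Cellular and Molecular Neuroscience','Cognitive Neuroscience',
--                    'Developmental Neuroscience', 'Neurology' ,'Phychiatric Mental Health','Psychology (miscellaneous)',
--                    'Experimental and Cognitive Psychology', 'Neuropsychology and Physiological Psychology'},
--         'NCD' : {'Cardiology', 'Cardiovascular Medicine','Cardiology and Cardiovascular Medicine',
--            'Endocrinology, Diabetes and Metabolism',
--             'Pulmonary and Respiratory Medicine'}}
--
--     # invert the themes table: subject -> theme (all subjects are distinct across themes)
--     subject_to_theme = {s: k for k, members in themes.items() for s in members}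
--
--     # one pass over the input: each recognised subject votes for its theme
--     votes = Counter(subject_to_theme[s] for s in alternative_subjects if s in subject_to_theme)
--
--     return max((k for k in themes if votes[k]), key=lambda k: votes[k])
-- ===== Notes on version B (the rewrite author's own statement) =====
-- stated objective: idiomatic
-- what changed: Inverts the traversal: instead of intersecting each theme set with the input, B builds a subject-to-theme index once, counts votes with one Counter pass over the input, and takes max over themes with a positive vote; Pre_ excludes inputs sharing no subject with any theme (both versions then raise ValueError from max() on an empty sequence) and lists with duplicate elements, which do not represent the set-typed parameter.
import Mathlib
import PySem

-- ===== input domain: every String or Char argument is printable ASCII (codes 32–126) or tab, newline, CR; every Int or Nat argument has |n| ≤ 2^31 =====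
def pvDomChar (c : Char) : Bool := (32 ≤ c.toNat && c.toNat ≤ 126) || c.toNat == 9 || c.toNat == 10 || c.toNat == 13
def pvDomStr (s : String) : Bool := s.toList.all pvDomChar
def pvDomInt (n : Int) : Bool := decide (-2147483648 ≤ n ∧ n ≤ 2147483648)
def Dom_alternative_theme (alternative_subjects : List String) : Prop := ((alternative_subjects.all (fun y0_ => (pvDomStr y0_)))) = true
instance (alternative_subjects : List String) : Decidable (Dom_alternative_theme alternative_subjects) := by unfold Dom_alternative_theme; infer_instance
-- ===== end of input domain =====

-- B inverts the traversal: a subject→theme index plus one Counter pass over the input, then max over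
-- positive themes; equal to A wherever A returns (Pre_: some overlap, input a genuine set = no duplicates).


-- the fixed 'themes' dict both Pythons define literally (dict insertion order; set members in source order)
def mCancer : List String := ["Cancer Research", "Oncology", "Cancer", "Radiation", "Oncology(nursing)"]
def mTripleI : List String := ["Endocrinology", "Immunology and Microbiology", "Immunology", "Microbiology",
      "Parasitology", "Virology", "Dermatology", "Allergy", "Infectious Diseases",
      "Rheumatology", "Toxicology"]
def mNHMA : List String := ["Clinical Neurology", "Psychiatry and Mental Health", "General Neuroscience",
      "Neuroscience (miscellaneous)", "Behavioral Neuroscience",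
      "Biological Psychiatry", "Cellular and Molecular Neuroscience", "Cognitive Neuroscience",
      "Developmental Neuroscience", "Neurology", "Phychiatric Mental Health", "Psychology (miscellaneous)",
      "Experimental and Cognitive Psychology", "Neuropsychology and Physiological Psychology"]
def mNCD : List String := ["Cardiology", "Cardiovascular Medicine", "Cardiology and Cardiovascular Medicine",
      "Endocrinology, Diabetes and Metabolism",
      "Pulmonary and Respiratory Medicine"]
def themesList : List (String × List String) :=
  [("Cancer", mCancer), ("Triple I", mTripleI), ("NHMA", mNHMA), ("NCD", mNCD)]

-- ===== PORT A =====
-- themes[key] & alternative_subjects (the set-typed parameter is a distinct-element list here)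
def pyIntersect (theme subjects : List String) : List String :=
  theme.filter (fun t => subjects.contains t)

-- max(result, key=lambda k: len(result[k])): first key of maximal value length; on [] Python raises
-- ValueError (excluded by Pre_), "" is the port's out-of-domain value there
def pyMaxByLen : List (String × List String) → String
  | [] => ""
  | p :: rest => (rest.foldl (fun b q => if q.2.length > b.2.length then q else b) p).1

def alternative_theme (alternative_subjects : List String) : String :=
  let result := themesList.foldl
    (fun acc kv =>
      if (pyIntersect kv.2 alternative_subjects).isEmpty then acc
      else acc ++ [(kv.1, pyIntersect kv.2 alternative_subjects)])
    []
  pyMaxByLen result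

-- ===== PORT B =====
-- {s: k for k, members in themes.items() for s in members}
def subjectToTheme : PySem.Dict String String :=
  themesList.foldl (fun d kv => kv.2.foldl (fun d s => d.insert s kv.1) d) PySem.Dict.empty

-- Counter(subject_to_theme[s] for s in alternative_subjects if s in subject_to_theme);
-- the guarded subscript 'subject_to_theme[s] … if s in subject_to_theme' is the filterMap of get?
-- max((k for k in themes if votes[k]), key=lambda k: votes[k]); on no positive vote Python's max
-- raises ValueError (excluded by Pre_), "" is the port's out-of-domain value there
def alternative_theme_alt (alternative_subjects : List String) : String :=
  let votes := PySem.Dict.counter (alternative_subjects.filterMap (fun s => subjectToTheme.get? s))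
  let candidates := (themesList.map Prod.fst).filter (fun k => votes.getD k 0 != 0)
  match PySem.List.max? candidates (fun k => votes.getD k 0) with
  | some k => k
  | none => ""

-- ===== PRECONDITION & SPEC =====
-- Pre_ excludes (a) inputs sharing no subject with any theme — there Python A raises ValueError
-- (max() of an empty sequence) and Python B raises the same ValueError — and (b) lists with
-- duplicate elements, which do not represent the set-typed parameter (the caller passes a set).
def Pre_alternative_theme (alternative_subjects : List String) : Prop :=
  alternative_subjects.Nodup ∧
  (themesList.any (fun kv => kv.2.any (fun m => alternative_subjects.contains m))) = true
instance (alternative_subjects : List String) : Decidable (Pre_alternative_theme alternative_subjects) := by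
  unfold Pre_alternative_theme; infer_instance

def pvWitness_alternative_theme : List String := ["Oncology", "Virology"]

def Spec_alternative_theme (alternative_subjects : List String) (out : String) : Prop := out = alternative_theme_alt alternative_subjects
instance (alternative_subjects : List String) (out : String) : Decidable (Spec_alternative_theme alternative_subjects out) := by unfold Spec_alternative_theme; infer_instance

-- ===== CLAIM (what is proved, stated in full; the proofs are below) =====
def Claim_equal_alternative_theme : Prop := ∀ (alternative_subjects : List String), Dom_alternative_theme alternative_subjects → Pre_alternative_theme alternative_subjects → Spec_alternative_theme alternative_subjects (alternative_theme alternative_subjects)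

-- ===== LEMMAS AND PROOFS =====

-- the inverted index looks a subject up to exactly the theme whose member list contains it
set_option maxRecDepth 100000 in
set_option maxHeartbeats 2000000 in
theorem subjectToTheme_mk :
    subjectToTheme = PySem.Dict.mk
      (mCancer.map (fun s => (s, "Cancer")) ++ mTripleI.map (fun s => (s, "Triple I"))
        ++ mNHMA.map (fun s => (s, "NHMA")) ++ mNCD.map (fun s => (s, "NCD"))) := by decide

theorem get?_mk_map_append (m : List String) (k : String) (rest : List (String × String)) (x : String) :
    (PySem.Dict.mk (m.map (fun s => (s, k)) ++ rest)).get? x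
      = if m.contains x then some k else (PySem.Dict.mk rest).get? x := by
  induction m with
  | nil => simp
  | cons h t ih =>
    simp only [List.map_cons, List.cons_append, PySem.Dict.get?_mk_cons, ih,
      List.contains_cons, beq_iff_eq, Bool.or_eq_true]
    by_cases hx : h = x
    · subst hx; simp
    · simp [hx, Ne.symm hx]

set_option maxHeartbeats 2000000 in
theorem get?_subjectToTheme (x : String) :
    subjectToTheme.get? x =
      if mCancer.contains x then some "Cancer"
      else if mTripleI.contains x then some "Triple I"
      else if mNHMA.contains x then some "NHMA"
      else if mNCD.contains x then some "NCD"
      else none := by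
  rw [subjectToTheme_mk]
  simp only [List.append_assoc]
  rw [get?_mk_map_append, get?_mk_map_append, get?_mk_map_append,
    show (mNCD.map (fun s => (s, "NCD")) : List (String × String))
        = mNCD.map (fun s => (s, "NCD")) ++ [] from (List.append_nil _).symm,
    get?_mk_map_append]
  split_ifs <;> rfl

-- Counter counts = A's intersection sizes
theorem count_filterMap {α β : Type} [DecidableEq β] (f : α → Option β) (l : List α) (k : β) :
    (l.filterMap f).count k = (l.filter (fun x => f x = some k)).length := by
  induction l with
  | nil => simp
  | cons h t ih =>
    cases hf : f h with
    | none => simp [hf, ih]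
    | some v =>
      by_cases hv : v = k
      · subst hv; simp [hf, ih]
      · simp [hf, ih, hv]

-- cross counting: |{x ∈ l : x ∈ m}| = |{t ∈ m : t ∈ l}| for duplicate-free lists
theorem cross_count (l m : List String) (hl : l.Nodup) (hm : m.Nodup) :
    (l.filter (fun x => m.contains x)).length = (m.filter (fun t => l.contains t)).length := by
  rw [← List.toFinset_card_of_nodup (hl.filter _), ← List.toFinset_card_of_nodup (hm.filter _),
    List.toFinset_filter, List.toFinset_filter]
  congr 1
  ext a
  simp only [Finset.mem_filter, List.mem_toFinset, List.contains_iff_mem]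
  exact and_comm

theorem votes_getD (l : List String) (hl : l.Nodup) (nm : String) (m : List String)
    (hmem : (nm, m) ∈ themesList) :
    (PySem.Dict.counter (l.filterMap (fun s => subjectToTheme.get? s))).getD nm 0
      = ((pyIntersect m l).length : Int) := by
  rw [PySem.Dict.getD_counter, count_filterMap]
  have hp : ∀ x, (decide (subjectToTheme.get? x = some nm)) = m.contains x := by
    intro x
    rw [get?_subjectToTheme]
    have d12 : ∀ y ∈ mCancer, y ∉ mTripleI := by decide
    have d13 : ∀ y ∈ mCancer, y ∉ mNHMA := by decide
    have d14 : ∀ y ∈ mCancer, y ∉ mNCD := by decide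
    have d23 : ∀ y ∈ mTripleI, y ∉ mNHMA := by decide
    have d24 : ∀ y ∈ mTripleI, y ∉ mNCD := by decide
    have d34 : ∀ y ∈ mNHMA, y ∉ mNCD := by decide
    fin_cases hmem <;> split_ifs <;> simp_all
  have hnodup : m.Nodup := by fin_cases hmem <;> decide
  rw [List.filter_congr (fun x _ => hp x), cross_count l m hl hnodup]
  simp [pyIntersect]

theorem inter_isEmpty (t s : List String) :
    (pyIntersect t s).isEmpty = !(t.any fun m => s.contains m) := by
  induction t with
  | nil => rfl
  | cons h t ih =>
    simp only [pyIntersect, List.filter_cons, List.any_cons] at *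
    cases hd : s.contains h
    · simp only [Bool.false_eq_true, if_false, Bool.false_or]
      exact ih
    · simp only [if_true, Bool.true_or, Bool.not_true, List.isEmpty_cons]

theorem any_eq_not_isEmpty (s t : List String) :
    (t.any fun m => s.contains m) = !(pyIntersect t s).isEmpty := by
  rw [inter_isEmpty]; simp

theorem fst_pair {A B : Type} (a : A) (b : B) : (a, b).1 = a := rfl
theorem snd_pair {A B : Type} (a : A) (b : B) : (a, b).2 = b := rfl

-- ===== VERDICT (by name: the statement is the Claim_ definition above) =====
set_option maxHeartbeats 3200000 in
theorem alternative_theme_spec : Claim_equal_alternative_theme := by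
  intro l _ hpre
  obtain ⟨hnd, hov⟩ := hpre
  have h1 := votes_getD l hnd "Cancer" mCancer (by simp [themesList])
  have h2 := votes_getD l hnd "Triple I" mTripleI (by simp [themesList])
  have h3 := votes_getD l hnd "NHMA" mNHMA (by simp [themesList])
  have h4 := votes_getD l hnd "NCD" mNCD (by simp [themesList])
  unfold Spec_alternative_theme alternative_theme alternative_theme_alt
  simp only [themesList, List.foldl_cons, List.foldl_nil, List.map_cons, List.map_nil,
    List.filter_cons, List.filter_nil, List.any_cons, List.any_nil, Bool.or_false,
    List.nil_append, h1, h2, h3, h4, any_eq_not_isEmpty] at hov ⊢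
  generalize hG1 : pyIntersect mCancer l = L1 at h1 h2 h3 h4 hov ⊢
  generalize hG2 : pyIntersect mTripleI l = L2 at h1 h2 h3 h4 hov ⊢
  generalize hG3 : pyIntersect mNHMA l = L3 at h1 h2 h3 h4 hov ⊢
  generalize hG4 : pyIntersect mNCD l = L4 at h1 h2 h3 h4 hov ⊢
  clear hG1 hG2 hG3 hG4
  simp only [List.isEmpty_iff_length_eq_zero, bne_iff_ne, ne_eq,
    Bool.or_eq_true, Bool.not_eq_eq_eq_not, Bool.not_true] at hov ⊢
  split_ifs <;>
    simp only [pyMaxByLen, PySem.List.max?, List.foldl_cons, List.foldl_nil, List.nil_append,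
      List.cons_append, List.append_nil, fst_pair, snd_pair, h1, h2, h3, h4] <;>
    (try split_ifs) <;>
    (try simp only [h1, h2, h3, h4, fst_pair, snd_pair]) <;>
    (try split_ifs) <;>
    (try simp only [h1, h2, h3, h4, fst_pair, snd_pair]) <;>
    (try split_ifs) <;>
    (try simp only [fst_pair, snd_pair] at *) <;>
    first | rfl | omega
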